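-- pv_equiv track=rewrite | github.com/b2sdev/CodeSignal-Solutions | Intro/level-12/fileNaming.py | solution
-- ===== SOURCE A (Python) =====
-- def solution(names):
--     seen = {}
--     result = []
--
--     for name in names:
--         if name not in seen:
--             seen[name] = 1
--             result.append(name)
--         else:
--             new_name = name
--             k = seen[name]
--             while new_name in seen:
--                 new_name = f"{name}({k})"
--                 k += 1
--             seen[name] = k
--             seen[new_name] = 1
--             result.append(new_name)
--
--     return result
-- ===== SOURCE B (Python) =====
-- def solution(names):
--     taken = set()
--     out = []
--     for name in names:
--         cands = [name] + [f"{name}({k})" for k in range(1, len(taken) + 2)]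
--         new = next(c for c in cands if c not in taken)
--         taken.add(new)
--         out.append(new)
--     return out
-- ===== Notes on version B (the rewrite author's own statement) =====
-- stated objective: simpler
-- what changed: B drops A's per-base resume-counter dict and duplicate/fresh branching: it keeps only a set of taken names and for each input name materialises the bounded candidate list [name, name(1), ..., name(len+1)] and takes its first entry not yet taken (guaranteed to exist by pigeonhole), instead of A's while-loop that resumes from a stored counter.
import Mathlib
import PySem

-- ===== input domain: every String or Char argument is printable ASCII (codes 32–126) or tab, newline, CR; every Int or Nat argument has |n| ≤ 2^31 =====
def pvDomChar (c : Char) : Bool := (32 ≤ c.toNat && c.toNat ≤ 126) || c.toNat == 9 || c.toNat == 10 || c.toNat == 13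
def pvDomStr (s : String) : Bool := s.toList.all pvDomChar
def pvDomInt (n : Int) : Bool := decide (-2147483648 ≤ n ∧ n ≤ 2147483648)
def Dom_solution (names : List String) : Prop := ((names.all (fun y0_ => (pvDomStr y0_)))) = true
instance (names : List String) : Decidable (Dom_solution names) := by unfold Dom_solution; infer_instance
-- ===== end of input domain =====

-- B replaces A's per-base resume-counter dict by a set of taken names plus, per name, a
-- bounded candidate list [name, name(1), …] from which the first free entry is taken
-- (simpler state, no resume bookkeeping); equivalence is proved below.


-- ===== PORT A =====
-- f"{name}({k})"
def pvCand (name : String) (k : Int) : String := name ++ "(" ++ PySem.Int.toStr k ++ ")"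

-- A's 'while new_name in seen: new_name = f"{name}({k})"; k += 1' loop, over the list of
-- taken names; the fuel only makes the recursion total (taken.length + 2 always suffices, proved below).
def pvFindLoop (fuel : Nat) (taken : List String) (name new_name : String) (k : Int) : String × Int :=
  match fuel with
  | 0 => (new_name, k)
  | fuel + 1 =>
      if new_name ∈ taken then pvFindLoop fuel taken name (pvCand name k) (k + 1)
      else (new_name, k)

-- the body of A's 'for name in names' loop; state = (seen, result)
def solutionStep (st : PySem.Dict String Int × List String) (name : String) :
    PySem.Dict String Int × List String :=
  let seen := st.1
  let result := st.2
  if seen.contains name = false then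
    (seen.insert name 1, result ++ [name])
  else
    -- 'k = seen[name]': name is a key here, so getD is exact (no KeyError is possible)
    let k := seen.getD name 0
    let r := pvFindLoop (seen.size + 2) seen.keys name name k
    ((seen.insert name r.2).insert r.1 1, result ++ [r.1])

def solution (names : List String) : List String :=
  (names.foldl solutionStep (PySem.Dict.empty, [])).2

-- ===== PORT B =====
-- '[name] + [f"{name}({k})" for k in range(1, len(taken) + 2)]'
def altCands (taken : PySem.Set String) (name : String) : List String :=
  name :: (PySem.List.pyRange 1 (PySem.Set.len taken + 2) 1).map (fun k => pvCand name k)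

-- 'next(c for c in cands if c not in taken)'; a free candidate always exists in the bounded
-- list (pigeonhole, proved below), so getD's default is never reached
def altPick (taken : PySem.Set String) (name : String) : String :=
  ((altCands taken name).find? (fun c => !(PySem.Set.contains taken c))).getD name

def solutionAltStep (st : PySem.Set String × List String) (name : String) :
    PySem.Set String × List String :=
  let new := altPick st.1 name
  (PySem.Set.add st.1 new, st.2 ++ [new])

def solution_alt (names : List String) : List String :=
  (names.foldl solutionAltStep (PySem.Set.empty, [])).2

-- ===== PRECONDITION & SPEC =====
def Spec_solution (names : List String) (out : List String) : Prop := out = solution_alt names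
instance (names : List String) (out : List String) : Decidable (Spec_solution names out) := by unfold Spec_solution; infer_instance

-- ===== CLAIM (what is proved, stated in full; the proofs are below) =====
def Claim_equal_solution : Prop := ∀ (names : List String), Dom_solution names → Spec_solution names (solution names)

-- ===== LEMMAS AND PROOFS =====

-- decimal digit characters are distinct
lemma pv_digitChar_inj : ∀ a < 10, ∀ b < 10, Nat.digitChar a = Nat.digitChar b → a = b := by decide

-- the digit string Nat.toDigits produces, written through Nat.digits
def pvPad (n : Nat) : List Char :=
  if n = 0 then ['0'] else ((Nat.digits 10 n).map Nat.digitChar).reverse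

lemma pv_toDigitsCore_eq : ∀ (fuel n : Nat), n < fuel → ∀ (ds : List Char),
    Nat.toDigitsCore 10 fuel n ds = pvPad n ++ ds := by
  intro fuel
  induction fuel with
  | zero => omega
  | succ fuel ih =>
      intro n hn ds
      simp only [Nat.toDigitsCore]
      by_cases h0 : n / 10 = 0
      · simp only [h0]
        rcases Nat.eq_zero_or_pos n with h | h
        · subst h; simp [pvPad]; rfl
        · have hne : n ≠ 0 := by omega
          have : Nat.digits 10 n = [n % 10] := by
            rw [Nat.digits_def' (by norm_num) h, h0]; simp
          have hmod : n % 10 = n := by omega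
          simp [pvPad, hne, this, hmod]
      · rw [if_neg h0, ih (n / 10) (by omega) _]
        have hnpos : 0 < n := by by_contra hh; push Not at hh; interval_cases n; simp at h0
        have hne : n ≠ 0 := by omega
        have hd : Nat.digits 10 n = n % 10 :: Nat.digits 10 (n / 10) := by
          rw [Nat.digits_def' (by norm_num) hnpos]
        simp [pvPad, hd, hne, h0]

lemma pv_toDigits_eq (n : Nat) : Nat.toDigits 10 n = pvPad n := by
  have := pv_toDigitsCore_eq (n + 1) n (by omega) []
  simpa [Nat.toDigits] using this

lemma pv_map_digitChar_inj : ∀ (l1 l2 : List Nat), (∀ x ∈ l1, x < 10) → (∀ x ∈ l2, x < 10) →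
    l1.map Nat.digitChar = l2.map Nat.digitChar → l1 = l2 := by
  intro l1
  induction l1 with
  | nil => intro l2 _ _ h; cases l2 <;> simp_all
  | cons a l1 ih =>
      intro l2 h1 h2 h
      cases l2 with
      | nil => simp at h
      | cons b l2 =>
          simp only [List.map_cons, List.cons.injEq] at h
          have hab := pv_digitChar_inj a (h1 a (by simp)) b (h2 b (by simp)) h.1
          have := ih l2 (fun x hx => h1 x (by simp [hx])) (fun x hx => h2 x (by simp [hx])) h.2
          simp [hab, this]

lemma pv_pad_inj {a b : Nat} (h : pvPad a = pvPad b) : a = b := by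
  by_cases ha : a = 0 <;> by_cases hb : b = 0
  · omega
  · exfalso
    simp only [pvPad, ha, hb] at h
    have : (Nat.digits 10 b).map Nat.digitChar = ['0'] := by
      have := congrArg List.reverse h; simpa using this.symm
    have hd : Nat.digits 10 b = [0] := by
      apply pv_map_digitChar_inj _ [0] (fun x hx => Nat.digits_lt_base (by norm_num) hx) (by simp)
      simpa using this
    have := Nat.ofDigits_digits 10 b
    rw [hd] at this; simp [Nat.ofDigits] at this; omega
  · exfalso
    simp only [pvPad, ha, hb] at h
    have : (Nat.digits 10 a).map Nat.digitChar = ['0'] := by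
      have := congrArg List.reverse h; simpa using this
    have hd : Nat.digits 10 a = [0] := by
      apply pv_map_digitChar_inj _ [0] (fun x hx => Nat.digits_lt_base (by norm_num) hx) (by simp)
      simpa using this
    have := Nat.ofDigits_digits 10 a
    rw [hd] at this; simp [Nat.ofDigits] at this; omega
  · simp only [pvPad, if_neg ha, if_neg hb] at h
    have h' := congrArg List.reverse h
    simp only [List.reverse_reverse] at h'
    have hd := pv_map_digitChar_inj _ _ (fun x hx => Nat.digits_lt_base (by norm_num) hx)
      (fun x hx => Nat.digits_lt_base (by norm_num) hx) h'
    have h1 := Nat.ofDigits_digits 10 a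
    have h2 := Nat.ofDigits_digits 10 b
    rw [hd] at h1; rw [h2] at h1; exact h1.symm

-- pvCand is injective in the index, for positive indices
lemma pv_cand_inj {name : String} {i j : Int} (hi : 1 ≤ i) (hj : 1 ≤ j)
    (h : pvCand name i = pvCand name j) : i = j := by
  have h' := congrArg String.toList h
  simp only [pvCand, String.toList_append, PySem.Int.toList_toStr, PySem.Int.toChars,
    if_neg (by omega : ¬ i < 0), if_neg (by omega : ¬ j < 0), pv_toDigits_eq,
    List.append_assoc, List.append_right_inj] at h'
  rw [List.append_left_inj] at h'
  have := pv_pad_inj h'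
  omega

-- a run of consecutive taken candidates is bounded by the number of taken names
lemma pv_run_bound {taken : List String} {name : String} {k : Int} (hk : 1 ≤ k)
    (T : Nat) (h : ∀ t < T, pvCand name (k + t) ∈ taken) :
    T ≤ taken.length := by
  have hinj : Function.Injective (fun t : Nat => pvCand name (k + t)) := by
    intro t1 t2 ht
    have := pv_cand_inj (by omega : (1:Int) ≤ k + t1) (by omega : (1:Int) ≤ k + t2) ht
    omega
  have hnodup : ((List.range T).map (fun t : Nat => pvCand name (k + t))).Nodup :=
    (List.nodup_range).map hinj
  have hsub : ((List.range T).map (fun t : Nat => pvCand name (k + t))) ⊆ taken := by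
    intro x hx
    simp only [List.mem_map, List.mem_range] at hx
    obtain ⟨t, ht, rfl⟩ := hx
    exact h t ht
  have := (List.subperm_of_subset hnodup hsub).length_le
  simpa using this

lemma pv_exists_free {taken : List String} {name : String} {k : Int} (hk : 1 ≤ k) :
    ∃ t : Nat, pvCand name (k + t) ∉ taken := by
  by_contra hc
  have hall : ∀ t : Nat, pvCand name (k + t) ∈ taken := fun t => by
    by_contra hf; exact hc ⟨t, hf⟩
  have := pv_run_bound hk (taken.length + 1) (fun t _ => hall t)
  omega

-- what A's while loop returns, given the least free index
lemma pv_findLoop_spec : ∀ (T fuel : Nat) (taken : List String) (name x : String) (k : Int),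
    x ∈ taken → (∀ t < T, pvCand name (k + t) ∈ taken) → pvCand name (k + T) ∉ taken →
    T + 2 ≤ fuel → pvFindLoop fuel taken name x k = (pvCand name (k + T), k + T + 1) := by
  intro T
  induction T with
  | zero =>
      intro fuel taken name x k hx _ hfree hfuel
      obtain ⟨f, rfl⟩ : ∃ f, fuel = f + 2 := ⟨fuel - 2, by omega⟩
      have h0 : pvCand name k ∉ taken := by simpa using hfree
      simp [pvFindLoop, hx, h0]
  | succ T ih =>
      intro fuel taken name x k hx hmin hfree hfuel
      obtain ⟨f, rfl⟩ : ∃ f, fuel = f + 1 := ⟨fuel - 1, by omega⟩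
      simp only [pvFindLoop, if_pos hx]
      have h0 : pvCand name k ∈ taken := by simpa using hmin 0 (by omega)
      have hmin' : ∀ t < T, pvCand name (k + 1 + t) ∈ taken := by
        intro t ht
        have e : k + 1 + (t : Int) = k + ((t + 1 : Nat) : Int) := by push_cast; ring
        rw [e]
        exact hmin (t + 1) (by omega)
      have hfree' : pvCand name (k + 1 + T) ∉ taken := by
        have e : k + 1 + (T : Int) = k + ((T + 1 : Nat) : Int) := by push_cast; ring
        rw [e]
        exact hfree
      have := ih f taken name (pvCand name k) (k + 1) h0 hmin' hfree' (by omega)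
      rw [this]
      have he : k + 1 + (T : Int) = k + ((T + 1 : Nat) : Int) := by push_cast; ring
      rw [he]

-- find? returns the element at the first index where the predicate holds
lemma pv_find?_first {α : Type} (p : α → Bool) : ∀ (l : List α) (i : Nat) (hi : i < l.length),
    (∀ j (hj : j < i), p (l[j]'(Nat.lt_trans hj hi)) = false) → p (l[i]'hi) = true →
    l.find? p = some (l[i]'hi) := by
  intro l
  induction l with
  | nil => intro i hi; simp at hi
  | cons a l ih =>
      intro i hi hmin hp
      cases i with
      | zero => simpa [List.find?_cons_of_pos] using List.find?_cons_of_pos (l := l) hp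
      | succ i =>
          have ha : p a = false := hmin 0 (by omega)
          rw [List.find?_cons_of_neg (by simp [ha])]
          exact ih i (by simpa using hi) (fun j hj => hmin (j + 1) (by omega)) hp

-- what B's first-free-candidate pick computes, given the least free index T ≥ 1 (duplicate case)
lemma pv_pick_spec_dup (taken : PySem.Set String) (name : String) (T : Nat)
    (hmem : name ∈ taken) (hmin : ∀ t < T, pvCand name (1 + t) ∈ taken)
    (hfree : pvCand name (1 + T) ∉ taken) (hT : T ≤ taken.length) :
    altPick taken name = pvCand name (1 + T) := by
  have hlen : (altCands taken name).length = taken.length + 2 := by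
    simp [altCands, PySem.Set.len, PySem.List.length_pyRange_one]
    omega
  have hget : ∀ (t : Nat) (ht : t < taken.length + 1),
      (altCands taken name)[t + 1]'(by omega) = pvCand name (1 + t) := by
    intro t ht
    have hlr : (PySem.List.pyRange 1 (PySem.Set.len taken + 2) 1).length = taken.length + 1 := by
      simp [PySem.Set.len, PySem.List.length_pyRange_one]; omega
    simp only [altCands, List.getElem_cons_succ, List.getElem_map]
    rw [PySem.List.getElem_pyRange_one]
  have hi : T + 1 < (altCands taken name).length := by omega
  have := pv_find?_first (fun c => !(PySem.Set.contains taken c)) (altCands taken name)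
      (T + 1) hi
      (by
        intro j hj
        cases j with
        | zero =>
            simp [altCands, PySem.Set.contains, hmem]
        | succ j =>
            rw [hget j (by omega)]
            have := hmin j (by omega)
            simp [PySem.Set.contains, this])
      (by
        rw [hget T (by omega)]
        simp [PySem.Set.contains, hfree])
  rw [altPick, this, hget T (by omega)]
  rfl

-- B's pick on a fresh name is the name itself
lemma pv_pick_spec_fresh (taken : PySem.Set String) (name : String) (hmem : name ∉ taken) :
    altPick taken name = name := by
  rw [altPick, altCands, List.find?_cons_of_pos (by simp [PySem.Set.contains, hmem])]
  rfl

-- the invariant relating A's dict to B's set of taken names: same keys = same outputs so far,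
-- and every resume counter seen[name] = k has name(1) … name(k-1) all taken already
def pvInv (seen : PySem.Dict String Int) (taken : List String) : Prop :=
  seen.keys = taken ∧ taken.Nodup ∧
  ∀ name k, seen.get? name = some k →
    1 ≤ k ∧ ∀ j : Int, 1 ≤ j → j < k → pvCand name j ∈ taken

lemma pv_step (seen : PySem.Dict String Int) (taken : List String) (res : List String)
    (name : String) (h : pvInv seen taken) :
    ∃ out seen' taken', solutionStep (seen, res) name = (seen', res ++ [out]) ∧
      solutionAltStep (taken, res) name = (taken', res ++ [out]) ∧ pvInv seen' taken' := by
  obtain ⟨hkeys, hnd, h4⟩ := h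
  by_cases hc : seen.contains name = true
  · -- duplicate branch
    have hmemname : name ∈ taken := by
      rw [← hkeys]; exact (PySem.Dict.contains_iff_mem_keys _ _).mp hc
    have hsome : (seen.get? name).isSome := by
      rw [← PySem.Dict.contains_eq_isSome_get?]; exact hc
    obtain ⟨k0, hk0⟩ := Option.isSome_iff_exists.mp hsome
    have hgetD : seen.getD name 0 = k0 := by
      rw [PySem.Dict.getD_eq_get?_getD, hk0]; rfl
    obtain ⟨hk0ge, hbelow⟩ := h4 name k0 hk0
    have hex : ∃ t : Nat, pvCand name (k0 + t) ∉ taken := pv_exists_free hk0ge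
    set TA := Nat.find hex with hTA
    have hfreeA : pvCand name (k0 + TA) ∉ taken := Nat.find_spec hex
    have hminA : ∀ t < TA, pvCand name (k0 + t) ∈ taken := by
      intro t ht
      have := Nat.find_min hex ht
      simpa using this
    have hTAle : TA ≤ taken.length := pv_run_bound hk0ge TA hminA
    have hsize : seen.size = taken.length := by
      have : seen.keys.length = seen.size := by
        simp [PySem.Dict.keys, PySem.Dict.size]
      rw [← this, hkeys]
    set J : Int := k0 + TA with hJ
    have hJ1 : 1 ≤ J := by omega
    have hA : pvFindLoop (seen.size + 2) seen.keys name name k0 =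
        (pvCand name J, J + 1) := by
      rw [hkeys, hsize]
      exact pv_findLoop_spec TA (taken.length + 2) taken name name k0 hmemname hminA hfreeA (by omega)
    set TB : Nat := (J - 1).toNat with hTB
    have hTBcast : (TB : Int) = J - 1 := Int.toNat_of_nonneg (by omega)
    have hminB : ∀ t < TB, pvCand name (1 + t) ∈ taken := by
      intro t ht
      have htJ : (1 : Int) + t < J := by
        have : (t : Int) < TB := by exact_mod_cast ht
        omega
      by_cases hlt : (1 : Int) + t < k0
      · exact hbelow (1 + t) (by omega) hlt
      · set u : Nat := ((1 : Int) + t - k0).toNat with hu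
        have hucast : (u : Int) = 1 + t - k0 := Int.toNat_of_nonneg (by omega)
        have hult : u < TA := by omega
        have := hminA u hult
        rw [show (1 : Int) + t = k0 + u by omega]
        exact this
    have hfreeB : pvCand name (1 + TB) ∉ taken := by
      rw [show (1 : Int) + (TB : Int) = k0 + (TA : Int) by omega]
      exact hfreeA
    have hTBle : TB ≤ taken.length := pv_run_bound (le_refl 1) TB hminB
    have hB : altPick taken name = pvCand name J := by
      rw [pv_pick_spec_dup taken name TB hmemname hminB hfreeB hTBle,
        show (1 : Int) + (TB : Int) = J by omega]
    have hnew : pvCand name J ∉ taken := hfreeA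
    have hne_name : pvCand name J ≠ name := by
      intro he
      apply hnew
      rw [he]
      exact hmemname
    have hcontains1 : seen.contains (pvCand name J) = false := by
      rw [← Bool.not_eq_true, PySem.Dict.contains_iff_mem_keys, hkeys]
      exact hnew
    have hcontains2 : (seen.insert name (J + 1)).contains (pvCand name J) = false := by
      rw [PySem.Dict.contains_insert, hcontains1]
      simp [hne_name]
    refine ⟨pvCand name J, (seen.insert name (J + 1)).insert (pvCand name J) 1,
      taken ++ [pvCand name J], ?_, ?_, ?_, ?_, ?_⟩
    · simp only [solutionStep, hc, hgetD, hA]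
      simp
    · simp only [solutionAltStep, hB]
      have : PySem.Set.add taken (pvCand name J) = taken ++ [pvCand name J] := by
        simp [PySem.Set.add, PySem.Set.contains, hnew]
      simp [this]
    · rw [PySem.Dict.keys_insert_of_not_contains _ _ hcontains2,
        PySem.Dict.keys_insert_of_contains _ _ hc, hkeys]
    · simp [List.nodup_append, hnd]
      exact fun a ha he => hnew (he ▸ ha)
    · intro nm k hk
      rw [PySem.Dict.get?_insert] at hk
      by_cases h1 : nm = pvCand name J
      · rw [if_pos h1] at hk
        obtain rfl : (1 : Int) = k := by simpa using hk
        exact ⟨le_refl 1, fun j hj1 hj2 => absurd (lt_of_le_of_lt hj1 hj2) (by omega)⟩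
      · rw [if_neg h1, PySem.Dict.get?_insert] at hk
        by_cases h2 : nm = name
        · subst h2
          obtain rfl : J + 1 = k := by simpa using hk
          refine ⟨by omega, fun j hj1 hj2 => ?_⟩
          by_cases hja : j < k0
          · exact List.mem_append_left _ (hbelow j hj1 hja)
          · by_cases hjb : j = J
            · subst hjb; exact List.mem_append_right _ (by simp)
            · set u : Nat := (j - k0).toNat with hu
              have hucast : (u : Int) = j - k0 := Int.toNat_of_nonneg (by omega)
              have hult : u < TA := by omega
              have := hminA u hult
              rw [show j = k0 + (u : Int) by omega]
              exact List.mem_append_left _ this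
        · rw [if_neg h2] at hk
          obtain ⟨hge, hb⟩ := h4 nm k hk
          exact ⟨hge, fun j hj1 hj2 => List.mem_append_left _ (hb j hj1 hj2)⟩
  · -- fresh branch
    have hcf : seen.contains name = false := by
      simpa using hc
    have hmem : name ∉ taken := by
      rw [← hkeys, ← PySem.Dict.contains_iff_mem_keys _ _]
      simp [hcf]
    refine ⟨name, seen.insert name 1, taken ++ [name], ?_, ?_, ?_, ?_, ?_⟩
    · simp [solutionStep, hcf]
    · simp only [solutionAltStep, pv_pick_spec_fresh taken name hmem]
      have : PySem.Set.add taken name = taken ++ [name] := by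
        simp [PySem.Set.add, PySem.Set.contains, hmem]
      simp [this]
    · rw [PySem.Dict.keys_insert_of_not_contains _ _ hcf, hkeys]
    · simp [List.nodup_append, hnd]
      exact fun a ha he => hmem (he ▸ ha)
    · intro nm k hk
      rw [PySem.Dict.get?_insert] at hk
      by_cases h1 : nm = name
      · rw [if_pos h1] at hk
        obtain rfl : (1 : Int) = k := by simpa using hk
        exact ⟨le_refl 1, fun j hj1 hj2 => absurd (lt_of_le_of_lt hj1 hj2) (by omega)⟩
      · rw [if_neg h1] at hk
        obtain ⟨hge, hb⟩ := h4 nm k hk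
        exact ⟨hge, fun j hj1 hj2 => List.mem_append_left _ (hb j hj1 hj2)⟩

lemma pv_fold (names : List String) : ∀ (seen : PySem.Dict String Int) (taken res : List String),
    pvInv seen taken →
    (names.foldl solutionStep (seen, res)).2 = (names.foldl solutionAltStep (taken, res)).2 := by
  induction names with
  | nil => intro seen taken res _; rfl
  | cons name names ih =>
      intro seen taken res h
      obtain ⟨out, seen', taken', hA, hB, h'⟩ := pv_step seen taken res name h
      simp only [List.foldl_cons, hA, hB]
      exact ih seen' taken' (res ++ [out]) h'

-- ===== VERDICT (by name: the statement is the Claim_ definition above) =====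
theorem solution_spec : Claim_equal_solution := by
  intro names _
  unfold Spec_solution solution solution_alt
  exact pv_fold names PySem.Dict.empty [] [] ⟨by simp, by simp, by simp⟩
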